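-- pv_equiv track=rewrite | github.com/0neF0rA11/Algorithms | Yandex_1_0/Hw_5/I.py | count_repeating_substrings
-- ===== SOURCE A (Python) =====
-- def count_repeating_substrings(k, string):
--     total_count = 0
--     consecutive_count = 0
--
--     for index in range(k, len(string)):
--         if string[index] == string[index - k]:
--             consecutive_count += 1
--             total_count += consecutive_count
--         else:
--             consecutive_count = 0
--
--     return total_count
-- ===== SOURCE B (Python) =====
-- def count_repeating_substrings(k, string):
--     # Build the match flags once, then sum a triangular closed form per maximal run.
--     flags = [string[i] == string[i - k] for i in range(k, len(string))]
--     n = len(flags)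
--     total = 0
--     i = 0
--     while i < n:
--         if flags[i]:
--             j = i
--             while j < n and flags[j]:
--                 j += 1
--             L = j - i
--             total += L * (L + 1) // 2
--             i = j
--         else:
--             i += 1
--     return total
-- ===== Notes on version B (the rewrite author's own statement) =====
-- stated objective: alternative
-- what changed: Replaces the running per-character accumulator (consecutive_count added into total at every match) by a two-phase computation: build the boolean match flags once, then scan maximal runs of True and add the triangular closed form L*(L+1)//2 per run.
import Mathlib
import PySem

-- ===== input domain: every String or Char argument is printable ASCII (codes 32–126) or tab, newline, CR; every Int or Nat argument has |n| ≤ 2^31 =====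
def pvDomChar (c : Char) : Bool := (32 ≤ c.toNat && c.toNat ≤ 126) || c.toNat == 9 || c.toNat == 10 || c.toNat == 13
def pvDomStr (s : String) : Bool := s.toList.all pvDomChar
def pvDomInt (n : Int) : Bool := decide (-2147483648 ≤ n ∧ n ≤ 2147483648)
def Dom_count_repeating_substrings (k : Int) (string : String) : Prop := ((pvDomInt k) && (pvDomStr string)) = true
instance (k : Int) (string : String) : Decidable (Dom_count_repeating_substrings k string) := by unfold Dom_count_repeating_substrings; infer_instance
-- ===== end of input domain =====

-- B replaces A's running accumulator by flags + per-run triangular closed form (alternative decomposition, same cost).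

-- ===== PORT A =====
def count_repeating_substrings (k : Int) (string : String) : Int :=
  let l := string.toList
  ((PySem.List.pyRange k (l.length : Int) 1).foldl
    (fun (st : Int × Int) index =>
      if PySem.List.pyGet? l index == PySem.List.pyGet? l (index - k)
      then (st.1 + (st.2 + 1), st.2 + 1)
      else (st.1, 0)) (0, 0)).1

-- ===== PORT B =====
-- the outer while loop of Source B: on a True flag, measure the maximal run (inner while), add L*(L+1)//2, resume after it
def pvRunScan : List Bool → Int
  | [] => 0
  | false :: rest => pvRunScan rest
  | true :: rest =>
    let L : Int := ((rest.takeWhile id).length : Int) + 1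
    PySem.Int.floordiv (L * (L + 1)) 2 + pvRunScan (rest.dropWhile id)
termination_by fs => fs.length
decreasing_by
  · simp
  · have := List.length_dropWhile_le (p := id) (l := rest); simp; omega

def count_repeating_substrings_alt (k : Int) (string : String) : Int :=
  let l := string.toList
  let flags := (PySem.List.pyRange k (l.length : Int) 1).map
    (fun i => PySem.List.pyGet? l i == PySem.List.pyGet? l (i - k))
  pvRunScan flags

-- ===== PRECONDITION & SPEC =====
-- Pre_ excludes k < 0, on which Python A raises IndexError (string[index - k] runs past the end).
def Pre_count_repeating_substrings (k : Int) (string : String) : Prop := 0 ≤ k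
instance (k : Int) (string : String) : Decidable (Pre_count_repeating_substrings k string) := by unfold Pre_count_repeating_substrings; infer_instance
def pvWitness_count_repeating_substrings : Int × String := (1, "aa")

def Spec_count_repeating_substrings (k : Int) (string : String) (out : Int) : Prop := out = count_repeating_substrings_alt k string
instance (k : Int) (string : String) (out : Int) : Decidable (Spec_count_repeating_substrings k string out) := by unfold Spec_count_repeating_substrings; infer_instance

-- ===== CLAIM (what is proved, stated in full; the proofs are below) =====
def Claim_equal_count_repeating_substrings : Prop := ∀ (k : Int) (string : String), Dom_count_repeating_substrings k string → Pre_count_repeating_substrings k string → Spec_count_repeating_substrings k string (count_repeating_substrings k string)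

-- ===== LEMMAS AND PROOFS =====
def pvTri (x : Int) : Int := PySem.Int.floordiv (x * (x + 1)) 2

lemma pvTri_succ (a : Int) : pvTri (a + 1) = pvTri a + a + 1 := by
  obtain ⟨b, hb⟩ := Int.even_mul_succ_self a
  unfold pvTri
  rw [PySem.Int.floordiv_eq_ediv_of_pos (by norm_num), PySem.Int.floordiv_eq_ediv_of_pos (by norm_num)]
  have h1 : a * (a + 1) = 2 * b := by omega
  have h2 : (a + 1) * ((a + 1) + 1) = 2 * (b + a + 1) := by
    rw [show (a + 1) * ((a + 1) + 1) = a * (a + 1) + 2 * (a + 1) by ring, h1]; ring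
  rw [h1, h2, Int.mul_ediv_cancel_left _ (by norm_num), Int.mul_ediv_cancel_left _ (by norm_num)]

lemma pvRunScan_eq_tri_add (r : List Bool) :
    pvRunScan r = pvTri ((r.takeWhile id).length : Int) + pvRunScan (r.dropWhile id) := by
  match r with
  | [] => simp [pvRunScan, pvTri, PySem.Int.floordiv]
  | false :: t => simp [pvRunScan, pvTri, PySem.Int.floordiv]
  | true :: t =>
    rw [pvRunScan]
    simp [pvTri]

lemma pvFoldA_eq (fs : List Bool) (t c : Int) :
    (fs.foldl (fun (st : Int × Int) f =>
        if f then (st.1 + (st.2 + 1), st.2 + 1) else (st.1, 0)) (t, c)).1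
      = t + pvRunScan fs + c * ((fs.takeWhile id).length : Int) := by
  induction fs generalizing t c with
  | nil => simp [pvRunScan]
  | cons f r ih =>
    cases f with
    | false => simp [List.foldl_cons, pvRunScan, ih]
    | true =>
      simp only [List.foldl_cons, if_true]
      rw [ih, pvRunScan, pvRunScan_eq_tri_add r]
      have hs : pvTri (((r.takeWhile id).length : Int) + 1)
          = pvTri ((r.takeWhile id).length : Int) + ((r.takeWhile id).length : Int) + 1 :=
        pvTri_succ _
      simp only [List.takeWhile_cons, id]
      simp only [if_true, List.length_cons]
      push_cast
      simp only [pvTri] at hs ⊢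
      rw [hs]
      ring

-- ===== VERDICT (by name: the statement is the Claim_ definition above) =====
theorem count_repeating_substrings_spec : Claim_equal_count_repeating_substrings := by
  intro k s _ _
  unfold Spec_count_repeating_substrings count_repeating_substrings count_repeating_substrings_alt
  have h := pvFoldA_eq ((PySem.List.pyRange k ((s.toList.length : Int)) 1).map
      (fun i => PySem.List.pyGet? s.toList i == PySem.List.pyGet? s.toList (i - k))) 0 0
  rw [List.foldl_map] at h
  simp only [zero_add, zero_mul, add_zero] at h
  exact h
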